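-- pv_equiv track=rewrite | github.com/thomasgwozdz/IW2018 | .gitignore/path_finder.py | poss_positions
-- ===== SOURCE A (Python) =====
-- import copy
--
-- def adjVerts(v, edges):
--     adj = []
--     for e in edges:
--         l = edges[e]
--         if l[0] == v:
--             adj.append(l[1])
--         elif l[1] == v:
--             adj.append(l[0])
--     adj.append(v)
--     return adj
--
-- def poss_positions(goal, edges, T, currposes):
--     if T <= 0:
--         # only take poss positions where last vertex is goal
--         validposes = []
--         for pos in currposes:
--             if pos[len(pos) - 1] == goal:
--                 validposes.append(pos)
--         return validposes
--
--     newcurrposes = []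
--     for pos in currposes:
--         v = pos[len(pos) - 1]
--         adjvs = adjVerts(v, edges)
--         for nv in adjvs:
--             newlist = copy.deepcopy(pos)
--             newlist.append(nv)
--             newcurrposes.append(newlist)
--
--     return poss_positions(goal, edges, (T-1), newcurrposes)
-- ===== SOURCE B (Python) =====
-- def poss_positions(goal, edges, T, currposes):
--     # Build the incidence pairs once, then group them into an adjacency map,
--     # so the per-path scan over all edges disappears; iterate T levels.
--     incs = []
--     for l in edges.values():
--         incs.append((l[0], l[1]))
--         if l[1] != l[0]:
--             incs.append((l[1], l[0]))
--     adj = {}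
--     for (k, x) in incs:
--         adj.setdefault(k, []).append(x)
--     current = currposes
--     for _ in range(T):
--         nxt = []
--         for pos in current:
--             last = pos[-1]
--             for nv in adj.get(last, []) + [last]:
--                 nxt.append(pos + [nv])
--         current = nxt
--     return [pos for pos in current if pos[-1] == goal]
-- ===== Notes on version B (the rewrite author's own statement) =====
-- stated objective: faster
-- what changed: B builds an adjacency map from the edge dict once and then grows the walk lists level by level in an explicit loop with plain list concatenation, instead of A's recursion over T that rescans every edge and deep-copies every path for each extension.
-- outside the precondition, e.g. on poss_positions(41, {2: [2], 7: [41, 1], 3: [], 44: []}, 35, []): A returns [], B raises IndexError; on poss_positions(0, {1: []}, 0, [[0]]): A returns [[0]], B raises IndexError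
import Mathlib
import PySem

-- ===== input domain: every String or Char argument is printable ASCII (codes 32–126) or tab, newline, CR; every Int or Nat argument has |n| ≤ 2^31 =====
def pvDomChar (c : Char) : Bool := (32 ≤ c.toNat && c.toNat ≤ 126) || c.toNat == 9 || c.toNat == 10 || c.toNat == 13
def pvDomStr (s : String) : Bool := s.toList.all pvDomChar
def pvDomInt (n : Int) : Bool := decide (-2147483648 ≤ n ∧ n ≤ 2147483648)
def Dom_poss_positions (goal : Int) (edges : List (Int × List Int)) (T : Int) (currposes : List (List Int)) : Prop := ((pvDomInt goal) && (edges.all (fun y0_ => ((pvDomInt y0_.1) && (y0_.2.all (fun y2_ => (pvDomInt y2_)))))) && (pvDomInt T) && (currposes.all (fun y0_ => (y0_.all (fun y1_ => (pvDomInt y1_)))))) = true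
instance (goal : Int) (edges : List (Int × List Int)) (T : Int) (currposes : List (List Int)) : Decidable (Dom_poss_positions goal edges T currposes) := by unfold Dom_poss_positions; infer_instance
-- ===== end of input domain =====

-- B replaces the T-fold recursion that rescans every edge per path with an
-- adjacency map built once plus an iterative level loop without deepcopy,
-- to avoid the per-path edge scan; equal return value.

-- ===== PORT A =====
-- adjVerts: for e in edges: l = edges[e]; … (dict iterated in canonical insertion order)
def adjVertsA (v : Int) (edges : List (Int × List Int)) : List Int :=
  ((PySem.Dict.ofList edges).items.foldl (fun adj e =>
      let l := e.2
      if PySem.List.pyGetD l 0 0 = v then adj ++ [PySem.List.pyGetD l 1 0]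
      else if PySem.List.pyGetD l 1 0 = v then adj ++ [PySem.List.pyGetD l 0 0]
      else adj) []) ++ [v]

def poss_positions (goal : Int) (edges : List (Int × List Int)) (T : Int) (currposes : List (List Int)) : List (List Int) :=
  if T ≤ 0 then
    -- validposes loop: keep poses whose pos[len(pos)-1] == goal
    currposes.foldl (fun vp pos =>
      if PySem.List.pyGetD pos ((pos.length : Int) - 1) 0 = goal then vp ++ [pos] else vp) []
  else
    let newcurrposes := currposes.foldl (fun acc pos =>
      let v := PySem.List.pyGetD pos ((pos.length : Int) - 1) 0
      (adjVertsA v edges).foldl (fun acc2 nv => acc2 ++ [pos ++ [nv]]) acc) []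
    poss_positions goal edges (T - 1) newcurrposes
termination_by T.toNat
decreasing_by omega

-- ===== PORT B =====
-- incs: both directed copies of each edge (self-loops once), in edge order
def incPairsB (edges : List (Int × List Int)) : List (Int × Int) :=
  (PySem.Dict.ofList edges).values.foldl (fun acc l =>
    let acc1 := acc ++ [(PySem.List.pyGetD l 0 0, PySem.List.pyGetD l 1 0)]
    if PySem.List.pyGetD l 1 0 ≠ PySem.List.pyGetD l 0 0 then
      acc1 ++ [(PySem.List.pyGetD l 1 0, PySem.List.pyGetD l 0 0)]
    else acc1) []

-- adj: group the incidence pairs (setdefault(k, []).append(x))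
def adjMapB (edges : List (Int × List Int)) : PySem.Dict Int (List Int) :=
  (incPairsB edges).foldl (fun d p => d.modify p.1 [] (· ++ [p.2])) PySem.Dict.empty

def poss_positions_alt (goal : Int) (edges : List (Int × List Int)) (T : Int) (currposes : List (List Int)) : List (List Int) :=
  let adj := adjMapB edges
  let current := (PySem.List.pyRange 0 T 1).foldl (fun cur _ =>
    cur.foldl (fun nxt pos =>
      let last := PySem.List.pyGetD pos (-1) 0
      (adj.getD last [] ++ [last]).foldl (fun nxt2 nv => nxt2 ++ [pos ++ [nv]]) nxt) []) currposes
  current.filter (fun pos => PySem.List.pyGetD pos (-1) 0 == goal)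

-- ===== PRECONDITION & SPEC =====
-- Pre_ excludes inputs where a dict value has fewer than 2 entries or a path is
-- empty: Python A raises IndexError whenever it touches them, and B's eager
-- adjacency build inspects every edge value even when A's lazy per-path scan
-- never would (T <= 0 or empty currposes), so B raises where A still returns.
def Pre_poss_positions (goal : Int) (edges : List (Int × List Int)) (T : Int) (currposes : List (List Int)) : Prop :=
  (∀ p ∈ (PySem.Dict.ofList edges).items, 2 ≤ p.2.length) ∧ (∀ pos ∈ currposes, pos ≠ [])
instance (goal : Int) (edges : List (Int × List Int)) (T : Int) (currposes : List (List Int)) : Decidable (Pre_poss_positions goal edges T currposes) := by unfold Pre_poss_positions; infer_instance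

def pvWitness_poss_positions : Int × (List (Int × List Int)) × Int × List (List Int) :=
  (1, [(0, [0, 1]), (1, [1, 2])], 2, [[0]])

def Spec_poss_positions (goal : Int) (edges : List (Int × List Int)) (T : Int) (currposes : List (List Int)) (out : List (List Int)) : Prop := out = poss_positions_alt goal edges T currposes
instance (goal : Int) (edges : List (Int × List Int)) (T : Int) (currposes : List (List Int)) (out : List (List Int)) : Decidable (Spec_poss_positions goal edges T currposes out) := by unfold Spec_poss_positions; infer_instance

-- ===== CLAIM (what is proved, stated in full; the proofs are below) =====
def Claim_equal_poss_positions : Prop := ∀ (goal : Int) (edges : List (Int × List Int)) (T : Int) (currposes : List (List Int)), Dom_poss_positions goal edges T currposes → Pre_poss_positions goal edges T currposes → Spec_poss_positions goal edges T currposes (poss_positions goal edges T currposes)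

-- ===== LEMMAS AND PROOFS =====

-- pos[len(pos)-1] and pos[-1] denote the same element (both default on [])
theorem pv_last_eq (pos : List Int) :
    PySem.List.pyGetD pos ((pos.length : Int) - 1) 0 = PySem.List.pyGetD pos (-1) 0 := by
  cases pos with
  | nil => rfl
  | cons x xs =>
    simp [PySem.List.pyGetD, PySem.List.pyGet?, PySem.List.pyIdx?]

-- per-edge branch of A as a list-valued function
def pvEdgeOut (v : Int) (l : List Int) : List Int :=
  if PySem.List.pyGetD l 0 0 = v then [PySem.List.pyGetD l 1 0]
  else if PySem.List.pyGetD l 1 0 = v then [PySem.List.pyGetD l 0 0]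
  else []

-- per-edge incidence pairs of B
def pvEdgePairs (l : List Int) : List (Int × Int) :=
  (PySem.List.pyGetD l 0 0, PySem.List.pyGetD l 1 0) ::
    (if PySem.List.pyGetD l 1 0 ≠ PySem.List.pyGetD l 0 0 then
      [(PySem.List.pyGetD l 1 0, PySem.List.pyGetD l 0 0)] else [])

-- the incidence pairs for v of one edge yield exactly A's per-edge branch
theorem pv_edge_eq (v : Int) (l : List Int) :
    pvEdgeOut v l = ((pvEdgePairs l).filter (fun p => p.1 == v)).map (·.2) := by
  unfold pvEdgeOut pvEdgePairs
  by_cases h0 : PySem.List.pyGetD l 0 0 = v <;>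
    by_cases h1 : PySem.List.pyGetD l 1 0 = v
  · simp_all
  · simp_all
  · have h0' : ¬ v = PySem.List.pyGetD l 0 0 := fun h => h0 h.symm
    simp_all
  · simp_all

theorem pv_incPairs_eq (edges : List (Int × List Int)) :
    incPairsB edges = (PySem.Dict.ofList edges).values.flatMap pvEdgePairs := by
  unfold incPairsB
  have hf : (fun (acc : List (Int × Int)) (l : List Int) =>
      let acc1 := acc ++ [(PySem.List.pyGetD l 0 0, PySem.List.pyGetD l 1 0)]
      if PySem.List.pyGetD l 1 0 ≠ PySem.List.pyGetD l 0 0 then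
        acc1 ++ [(PySem.List.pyGetD l 1 0, PySem.List.pyGetD l 0 0)]
      else acc1) = fun acc l => acc ++ pvEdgePairs l := by
    funext acc l
    simp only [pvEdgePairs]
    split_ifs <;> simp
  rw [hf, PySem.List.foldl_append_eq_flatMap]
  simp

-- A's adjacency scan for v equals the v-filtered incidence pairs
theorem pv_scan_eq (v : Int) (edges : List (Int × List Int)) :
    adjVertsA v edges =
      (((PySem.Dict.ofList edges).values.flatMap pvEdgePairs).filter
        (fun p => p.1 == v)).map (·.2) ++ [v] := by
  unfold adjVertsA
  have hf : (fun (adj : List Int) (e : Int × List Int) =>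
      let l := e.2
      if PySem.List.pyGetD l 0 0 = v then adj ++ [PySem.List.pyGetD l 1 0]
      else if PySem.List.pyGetD l 1 0 = v then adj ++ [PySem.List.pyGetD l 0 0]
      else adj) = fun adj e => adj ++ pvEdgeOut v e.2 := by
    funext adj e
    simp only [pvEdgeOut]
    split_ifs <;> simp
  rw [hf, PySem.List.foldl_append_eq_flatMap]
  have hvals : (PySem.Dict.ofList edges).items.flatMap (fun e => pvEdgeOut v e.2) =
      (PySem.Dict.ofList edges).values.flatMap (fun l => pvEdgeOut v l) := by
    simp [PySem.Dict.values, List.flatMap_map]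
  rw [hvals]
  congr 1
  induction (PySem.Dict.ofList edges).values with
  | nil => simp
  | cons l ls ih =>
    simp only [List.flatMap_cons, List.filter_append, List.map_append, List.nil_append] at ih ⊢
    rw [pv_edge_eq, ih]

-- B's adjacency lookup (plus the vertex itself) is exactly A's adjVerts
theorem pv_adj_eq (edges : List (Int × List Int)) (v : Int) :
    (adjMapB edges).getD v [] ++ [v] = adjVertsA v edges := by
  unfold adjMapB
  rw [PySem.Dict.getD_foldl_modify_append, PySem.Dict.getD_empty,
    pv_incPairs_eq, pv_scan_eq]
  simp

-- one breadth level, as B computes it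
def pvStep (edges : List (Int × List Int)) (cur : List (List Int)) : List (List Int) :=
  cur.foldl (fun nxt pos =>
    let last := PySem.List.pyGetD pos (-1) 0
    ((adjMapB edges).getD last [] ++ [last]).foldl (fun nxt2 nv => nxt2 ++ [pos ++ [nv]]) nxt) []

theorem pv_stepA_eq (edges : List (Int × List Int)) (cur : List (List Int)) :
    cur.foldl (fun acc pos =>
      let v := PySem.List.pyGetD pos ((pos.length : Int) - 1) 0
      (adjVertsA v edges).foldl (fun acc2 nv => acc2 ++ [pos ++ [nv]]) acc) [] =
    pvStep edges cur := by
  unfold pvStep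
  congr 1
  funext acc pos
  simp only [pv_last_eq, ← pv_adj_eq]

theorem pv_filter_eq (goal : Int) (cur : List (List Int)) :
    cur.foldl (fun vp pos =>
      if PySem.List.pyGetD pos ((pos.length : Int) - 1) 0 = goal then vp ++ [pos] else vp) [] =
    cur.filter (fun pos => PySem.List.pyGetD pos (-1) 0 == goal) := by
  have hf : (fun (vp : List (List Int)) (pos : List Int) =>
      if PySem.List.pyGetD pos ((pos.length : Int) - 1) 0 = goal then vp ++ [pos] else vp) =
      fun vp pos =>
        if (fun pos => PySem.List.pyGetD pos (-1) 0 == goal) pos = true then vp ++ [id pos] else vp := by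
    funext vp pos
    rw [pv_last_eq]
    simp
  rw [hf, PySem.List.foldl_append_if]
  simp

theorem pv_main (goal : Int) (edges : List (Int × List Int)) :
    ∀ (n : Nat) (T : Int), T.toNat = n → ∀ cur,
      poss_positions goal edges T cur =
        ((pvStep edges)^[n] cur).filter (fun pos => PySem.List.pyGetD pos (-1) 0 == goal) := by
  intro n
  induction n with
  | zero =>
    intro T hT cur
    have hle : T ≤ 0 := by omega
    rw [poss_positions]
    simp only [hle, if_true, Function.iterate_zero, id]
    exact pv_filter_eq goal cur
  | succ k ih =>
    intro T hT cur
    have hpos : ¬ T ≤ 0 := by omega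
    rw [poss_positions]
    simp only [hpos, if_false]
    rw [pv_stepA_eq, ih (T - 1) (by omega), Function.iterate_succ_apply]

theorem pv_foldl_const {α β : Type} (f : α → α) :
    ∀ (l : List β) (x : α), l.foldl (fun c _ => f c) x = f^[l.length] x := by
  intro l
  induction l with
  | nil => intro x; rfl
  | cons b bs ih =>
    intro x
    simp [List.foldl_cons, ih, Function.iterate_succ_apply]

theorem pv_alt_eq (goal : Int) (edges : List (Int × List Int)) (T : Int) (cur : List (List Int)) :
    poss_positions_alt goal edges T cur =
      ((pvStep edges)^[T.toNat] cur).filter (fun pos => PySem.List.pyGetD pos (-1) 0 == goal) := by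
  show ((PySem.List.pyRange 0 T 1).foldl (fun c (_ : Int) => pvStep edges c) cur).filter
      (fun pos => PySem.List.pyGetD pos (-1) 0 == goal) =
    ((pvStep edges)^[T.toNat] cur).filter (fun pos => PySem.List.pyGetD pos (-1) 0 == goal)
  rw [pv_foldl_const]
  have hlen : (PySem.List.pyRange 0 T 1).length = T.toNat := by
    rw [PySem.List.length_pyRange_one]; omega
  rw [hlen]

-- ===== VERDICT (by name: the statement is the Claim_ definition above) =====
theorem poss_positions_spec : Claim_equal_poss_positions := by
  intro goal edges T currposes _ _
  unfold Spec_poss_positions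
  rw [pv_alt_eq, pv_main goal edges T.toNat T rfl]
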